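-- pv_equiv track=rewrite | github.com/bblinder62/Blinder_Steganography | Files/DenseEncoding.py | full_service_decryption
-- ===== SOURCE A (Python) =====
-- def one_time_pad_encrypt(plaintext, key):
--     if len(plaintext) != len(key):
--         raise ValueError("Message and key must be of the same length")
--     encrypted_message = ''
--     for i in range(len(plaintext)):
--         encrypted_message += str(int(plaintext[i]) ^ int(key[i]))
--     return encrypted_message
--
-- def one_time_pad_decrypt(ciphertext, key):
--     return one_time_pad_encrypt(ciphertext, key)
--
-- def full_service_decryption(binary_string):
--     # Decrypt
--     temp_index = 8  # Start at 8 to skip the first 8 bits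
--     new_binary = list(binary_string)
--     previous_bits = binary_string[:8]
--     for i in range((len(binary_string) // 8) - 1):  # Adjusted loop boundary
--         # Extract the key from the previous ciphertext block
--         key = binary_string[temp_index - 8:temp_index]
--         new_binary[temp_index:temp_index + 8] = one_time_pad_decrypt(binary_string[temp_index:temp_index + 8], key)
--         temp_index += 8
--
--     new_binary = "".join(new_binary)
--     return new_binary
-- ===== SOURCE B (Python) =====
-- def full_service_decryption(binary_string):
--     n = len(binary_string)
--     limit = 8 * (n // 8)
--     out = []
--     for i in range(n):
--         if 8 <= i < limit:
--             out.append(str(int(binary_string[i]) ^ int(binary_string[i - 8])))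
--         else:
--             out.append(binary_string[i])
--     return "".join(out)
-- ===== Notes on version B (the rewrite author's own statement) =====
-- stated objective: simpler
-- what changed: Replaces the block-wise loop with in-place list slice surgery and the one_time_pad helper pair by a single flat pass that XORs each character with the character 8 positions earlier in the original string (for indices in [8, 8*(n//8))) and joins the result.
-- outside the precondition, e.g. on full_service_decryption('2222222233333333'): A returns '2222222211111111', B returns '2222222211111111'
import Mathlib
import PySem

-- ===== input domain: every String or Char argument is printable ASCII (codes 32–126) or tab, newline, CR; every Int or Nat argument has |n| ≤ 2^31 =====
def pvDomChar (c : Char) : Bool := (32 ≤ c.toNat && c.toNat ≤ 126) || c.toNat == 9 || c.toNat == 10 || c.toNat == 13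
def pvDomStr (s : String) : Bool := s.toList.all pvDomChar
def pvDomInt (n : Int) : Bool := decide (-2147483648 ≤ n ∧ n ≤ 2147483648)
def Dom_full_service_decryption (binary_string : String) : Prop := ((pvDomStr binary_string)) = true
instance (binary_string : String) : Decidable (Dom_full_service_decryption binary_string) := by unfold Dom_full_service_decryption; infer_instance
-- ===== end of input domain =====

-- B replaces A's block-wise loop with slice surgery by one flat pass XOR-ing each char with
-- the char 8 positions earlier (objective: simpler); equivalence on binary-digit inputs (Pre_).

-- shared primitive: str(int(a) ^ int(b)) for single chars (int() of a non-digit raises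
-- ValueError; the .getD 0 default is only reached outside Pre_)
def pyDigit (c : Char) : Int := (PySem.Int.ofStr? (String.mk [c])).getD 0
def pyXorChars (a b : Char) : List Char :=
  PySem.Int.toChars (((pyDigit a).toNat ^^^ (pyDigit b).toNat : Nat) : Int)

-- ===== PORT A =====
def one_time_pad_encrypt (plaintext key : List Char) : List Char :=
  if plaintext.length ≠ key.length then []  -- raise ValueError (never reached from full_service_decryption)
  else (List.range plaintext.length).foldl
    (fun acc i => acc ++ pyXorChars (plaintext.getD i ' ') (key.getD i ' ')) []

def one_time_pad_decrypt (ciphertext key : List Char) : List Char :=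
  one_time_pad_encrypt ciphertext key

-- range((len//8)-1): for len//8 = 0 Python's range(-1) is empty, as is Nat's 0 - 1 = 0;
-- the slices binary_string[a:b] here have 0 ≤ a ≤ b so they are exactly (drop a).take (b-a)
def full_service_decryption (binary_string : String) : String :=
  let l := binary_string.toList
  let final := (List.range (l.length / 8 - 1)).foldl
    (fun (st : Nat × List Char) _ =>
      let key := (l.drop (st.1 - 8)).take 8
      let dec := one_time_pad_decrypt ((l.drop st.1).take 8) key
      (st.1 + 8, st.2.take st.1 ++ dec ++ st.2.drop (st.1 + 8)))
    (8, l)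
  String.mk final.2

-- ===== PORT B =====
def full_service_decryption_alt (binary_string : String) : String :=
  let l := binary_string.toList
  let limit := 8 * (l.length / 8)
  String.mk (((List.range l.length).map (fun i =>
    if 8 ≤ i ∧ i < limit then pyXorChars (l.getD i ' ') (l.getD (i - 8) ' ')
    else [l.getD i ' '])).flatten)

-- ===== PRECONDITION & SPEC =====
-- Pre_ excludes strings of length ≥ 16 whose first 8*(len//8) characters are not all '0'/'1':
-- a non-digit there makes A raise ValueError, and digit pairs XOR-ing above 9 make A's
-- slice assignment insert two characters and shift every later block — an artefact of the
-- in-place list surgery, outside the function's binary-string purpose.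
def Pre_full_service_decryption (binary_string : String) : Prop :=
  binary_string.toList.length < 16 ∨
    ∀ c ∈ binary_string.toList.take (8 * (binary_string.toList.length / 8)),
      c = '0' ∨ c = '1'
instance (binary_string : String) : Decidable (Pre_full_service_decryption binary_string) := by
  unfold Pre_full_service_decryption; infer_instance

def pvWitness_full_service_decryption : String := "0101"

def Spec_full_service_decryption (binary_string : String) (out : String) : Prop :=
  out = full_service_decryption_alt binary_string
instance (binary_string : String) (out : String) : Decidable (Spec_full_service_decryption binary_string out) := by
  unfold Spec_full_service_decryption; infer_instance

-- ===== CLAIM (what is proved, stated in full; the proofs are below) =====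
def Claim_equal_full_service_decryption : Prop :=
  ∀ (binary_string : String), Dom_full_service_decryption binary_string →
    Pre_full_service_decryption binary_string →
    Spec_full_service_decryption binary_string (full_service_decryption binary_string)

-- ===== LEMMAS AND PROOFS =====

-- the decrypted bit at position i (proof abbreviation only)
def pvBit (l : List Char) (i : Nat) : Char :=
  if l.getD i ' ' == l.getD (i - 8) ' ' then '0' else '1'

-- the per-position function both sides compute under Pre_
def pvH (l : List Char) (i : Nat) : Char :=
  if 8 ≤ i ∧ i < 8 * (l.length / 8) then pvBit l i else l.getD i ' '

theorem pyXorChars_bit (a b : Char) (ha : a = '0' ∨ a = '1') (hb : b = '0' ∨ b = '1') :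
    pyXorChars a b = [if a == b then '0' else '1'] := by
  rcases ha with rfl | rfl <;> rcases hb with rfl | rfl <;> decide

theorem map_getD_range (l : List Char) (t k : Nat) (h : t + k ≤ l.length) :
    (List.range k).map (fun j => l.getD (t + j) ' ') = (l.drop t).take k := by
  apply List.ext_getElem
  · simp; omega
  · intro i h1 h2
    simp only [List.getElem_map, List.getElem_range, List.getElem_take, List.getElem_drop]
    rw [List.getD_eq_getElem l ' ' (by simp at h1 ⊢; omega)]

theorem flatten_map_single {α β : Type} (f : α → β) (xs : List α) :
    (xs.map (fun x => [f x])).flatten = xs.map f := by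
  induction xs with
  | nil => rfl
  | cons x xs ih => simp [ih]

theorem foldl_app (f : Nat → List Char) (xs : List Nat) (acc : List Char) :
    xs.foldl (fun a i => a ++ f i) acc = acc ++ (xs.map f).flatten := by
  induction xs generalizing acc with
  | nil => simp
  | cons x xs ih => simp [ih, List.append_assoc]

theorem getD_mem_take (l : List Char) (limit i : Nat) (hi : i < limit) (hl : limit ≤ l.length) :
    l.getD i ' ' ∈ l.take limit := by
  have hlen : i < l.length := lt_of_lt_of_le hi hl
  rw [List.getD_eq_getElem l ' ' hlen]
  have : l[i] = (l.take limit)[i]'(by simp; omega) := by simp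
  rw [this]; exact List.getElem_mem _

-- decryption of one full block, under Pre_'s binary-span condition
theorem otp_block (l : List Char) (t : Nat)
    (hPre : ∀ c ∈ l.take (8 * (l.length / 8)), c = '0' ∨ c = '1')
    (h8 : 8 ≤ t) (hb : t + 8 ≤ 8 * (l.length / 8)) :
    one_time_pad_encrypt ((l.drop t).take 8) ((l.drop (t - 8)).take 8)
      = (List.range 8).map (fun j => pvH l (t + j)) := by
  have hlim : 8 * (l.length / 8) ≤ l.length := by
    have := Nat.div_mul_le_self l.length 8; omega
  have hp : ((l.drop t).take 8).length = 8 := by simp; omega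
  have hk : ((l.drop (t - 8)).take 8).length = 8 := by simp; omega
  unfold one_time_pad_encrypt
  rw [if_neg (by rw [hp, hk]; simp)]
  rw [hp, foldl_app, List.nil_append]
  rw [show (List.range 8).map (fun j => pvH l (t + j))
      = ((List.range 8).map (fun j => [pvH l (t + j)])).flatten from
      (flatten_map_single _ _).symm]
  congr 1
  apply List.map_congr_left
  intro j hj
  rw [List.mem_range] at hj
  have e1 : ((l.drop t).take 8).getD j ' ' = l.getD (t + j) ' ' := by
    rw [← map_getD_range l t 8 (by omega)]
    simp [List.getD_eq_getElem?_getD, hj]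
  have e2 : ((l.drop (t - 8)).take 8).getD j ' ' = l.getD (t - 8 + j) ' ' := by
    rw [← map_getD_range l (t - 8) 8 (by omega)]
    simp [List.getD_eq_getElem?_getD, hj]
  rw [e1, e2]
  have c1 := hPre _ (getD_mem_take l _ (t + j) (by omega) hlim)
  have c2 := hPre _ (getD_mem_take l _ (t - 8 + j) (by omega) hlim)
  rw [pyXorChars_bit _ _ c1 c2]
  have : t + j - 8 = t - 8 + j := by omega
  simp [pvH, pvBit, this]
  omega

-- loop invariant for A: after k iterations the state is
-- (8*(k+1), decrypted prefix of length 8*(k+1) ++ untouched original tail)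
theorem loop_inv (l : List Char) (hn : 8 ≤ l.length)
    (hPre : ∀ c ∈ l.take (8 * (l.length / 8)), c = '0' ∨ c = '1') :
    ∀ k, k ≤ l.length / 8 - 1 →
      (List.range k).foldl
        (fun (st : Nat × List Char) _ =>
          let key := (l.drop (st.1 - 8)).take 8
          let dec := one_time_pad_decrypt ((l.drop st.1).take 8) key
          (st.1 + 8, st.2.take st.1 ++ dec ++ st.2.drop (st.1 + 8)))
        (8, l)
      = (8 * (k + 1), (List.range (8 * (k + 1))).map (pvH l) ++ l.drop (8 * (k + 1))) := by
  have hlim : 8 * (l.length / 8) ≤ l.length := by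
    have := Nat.div_mul_le_self l.length 8; omega
  have hd1 : 1 ≤ l.length / 8 := (Nat.one_le_div_iff (by omega)).2 hn
  intro k hk
  induction k with
  | zero =>
    simp only [List.range_zero, List.foldl_nil]
    congr 1
    have h0 : (List.range 8).map (pvH l) = (List.range 8).map (fun j => l.getD j ' ') := by
      apply List.map_congr_left; intro j hj
      rw [List.mem_range] at hj
      simp [pvH]; omega
    rw [h0, show (fun j => l.getD j ' ') = (fun j => l.getD (0 + j) ' ') from by funext j; simp,
        map_getD_range l 0 8 (by omega)]
    simp
  | succ k ih =>
    have hk' : k ≤ l.length / 8 - 1 := by omega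
    rw [List.range_succ, List.foldl_append, ih hk', List.foldl_cons, List.foldl_nil]
    simp only
    have ht8 : 8 * (k + 1) + 8 ≤ 8 * (l.length / 8) := by
      have : k + 2 ≤ l.length / 8 := by omega
      omega
    set t := 8 * (k + 1) with htdef
    have hPlen : ((List.range t).map (pvH l)).length = t := by simp
    rw [Prod.mk.injEq]
    refine ⟨by omega, ?_⟩
    · rw [one_time_pad_decrypt, otp_block l t hPre (by omega) ht8]
      rw [List.take_append_of_le_length (by omega), List.take_of_length_le (by omega)]
      rw [show t + 8 = ((List.range t).map (pvH l)).length + 8 from by omega,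
          List.drop_append, List.drop_drop]
      rw [show 8 * (k + 1 + 1) = t + 8 from by omega, List.range_add, List.map_append,
          List.map_map]
      simp [List.append_assoc]
      rw [List.drop_eq_nil_of_le (by simp), List.nil_append]
      rfl

-- B's list equals (range n).map (pvH l) under Pre_'s binary-span condition
theorem alt_eq (l : List Char)
    (hPre : ∀ c ∈ l.take (8 * (l.length / 8)), c = '0' ∨ c = '1') :
    ((List.range l.length).map (fun i =>
      if 8 ≤ i ∧ i < 8 * (l.length / 8) then pyXorChars (l.getD i ' ') (l.getD (i - 8) ' ')
      else [l.getD i ' '])).flatten = (List.range l.length).map (pvH l) := by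
  have hlim : 8 * (l.length / 8) ≤ l.length := by
    have := Nat.div_mul_le_self l.length 8; omega
  rw [← flatten_map_single (pvH l)]
  congr 1
  apply List.map_congr_left
  intro i hi
  rw [List.mem_range] at hi
  by_cases h : 8 ≤ i ∧ i < 8 * (l.length / 8)
  · rw [if_pos h]
    have c1 := hPre _ (getD_mem_take l _ i h.2 hlim)
    have c2 := hPre _ (getD_mem_take l _ (i - 8) (by omega) hlim)
    rw [pyXorChars_bit _ _ c1 c2]
    simp [pvH, pvBit, h]
  · rw [if_neg h]; simp [pvH, h]

-- the final decrypted list: map over range n splits at limit, tail is the original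
theorem final_eq (l : List Char) :
    (List.range (8 * (l.length / 8))).map (pvH l) ++ l.drop (8 * (l.length / 8))
      = (List.range l.length).map (pvH l) := by
  have hlim : 8 * (l.length / 8) ≤ l.length := by
    have := Nat.div_mul_le_self l.length 8; omega
  set limit := 8 * (l.length / 8) with hl
  rw [show l.length = limit + (l.length - limit) from by omega, List.range_add,
      List.map_append, List.map_map]
  congr 1
  have : (List.range (l.length - limit)).map (pvH l ∘ (limit + ·))
      = (List.range (l.length - limit)).map (fun j => l.getD (limit + j) ' ') := by
    apply List.map_congr_left; intro j hj; rw [List.mem_range] at hj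
    simp [Function.comp, pvH]; omega
  rw [this, map_getD_range l limit (l.length - limit) (by omega)]
  rw [List.take_of_length_le (by simp)]

-- ===== VERDICT (by name: the statement is the Claim_ definition above) =====
theorem full_service_decryption_spec : Claim_equal_full_service_decryption := by
  intro s _ hPre
  unfold Spec_full_service_decryption full_service_decryption full_service_decryption_alt
  set l := s.toList with hldef
  simp only
  rcases Nat.lt_or_ge l.length 16 with h16 | h16
  · -- short strings: the loop is empty and B's XOR region is empty
    have hdiv : l.length / 8 - 1 = 0 := by omega
    rw [hdiv]
    simp only [List.range_zero, List.foldl_nil]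
    congr 1
    have : ((List.range l.length).map (fun i =>
        if 8 ≤ i ∧ i < 8 * (l.length / 8) then pyXorChars (l.getD i ' ') (l.getD (i - 8) ' ')
        else [l.getD i ' '])) = (List.range l.length).map (fun i => [l.getD i ' ']) := by
      apply List.map_congr_left; intro i hi; rw [List.mem_range] at hi
      rw [if_neg]
      rintro ⟨h8, hlt⟩
      have : 8 * (l.length / 8) ≤ 8 := by
        have : l.length / 8 ≤ 1 := by omega
        omega
      omega
    rw [this, flatten_map_single]
    rw [show (fun i => l.getD i ' ') = (fun j => l.getD (0 + j) ' ') from by funext j; simp,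
        map_getD_range l 0 l.length (by omega)]
    simp
  · -- long strings: Pre_'s binary-span condition holds
    have hPre2 : ∀ c ∈ l.take (8 * (l.length / 8)), c = '0' ∨ c = '1' := by
      rcases hPre with h | h
      · exact absurd h (by rw [← hldef]; omega)
      · exact h
    have hn : 8 ≤ l.length := by omega
    have hfin := loop_inv l hn hPre2 (l.length / 8 - 1) le_rfl
    rw [hfin]
    have hd1 : 1 ≤ l.length / 8 := (Nat.one_le_div_iff (by omega)).2 hn
    rw [show 8 * (l.length / 8 - 1 + 1) = 8 * (l.length / 8) from by omega]
    rw [alt_eq l hPre2]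
    congr 1
    exact final_eq l
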